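-- pv_equiv track=rewrite | github.com/kimjune01/june.kim | worklog/matroid_exchange2.py | temporal_neighborhoods_strict
-- ===== SOURCE A (Python) =====
-- def temporal_neighborhoods_strict(n, timestamps):
--     """
--     N(i) = collectors reachable from emitter i via a strict 2-hop temporal journey.
--     Journey: i -> c at time t1, then e -> j at time t2, where t1 < t2.
--     We do NOT require e=i or c=j (that would be a 1-hop).
--     But we DO require the journey passes through an intermediate.
--     """
--     neighborhoods = {}
--     for i in range(n):
--         reachable = set()
--         for c in range(n):
--             if (i, c) not in timestamps:
--                 continue
--             t1 = timestamps[(i, c)]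
--             for e in range(n):
--                 for j in range(n):
--                     if (e, j) not in timestamps:
--                         continue
--                     t2 = timestamps[(e, j)]
--                     if t1 < t2:
--                         reachable.add(j)
--         neighborhoods[i] = frozenset(reachable)
--     return neighborhoods
-- ===== SOURCE B (Python) =====
-- def temporal_neighborhoods_strict(n, timestamps):
--     """
--     Same result as A, computed from the edges that actually exist instead of
--     scanning the n x n grid:
--     - the present in-range edges are listed once from timestamps.items() and
--       sorted into (emitter, collector) grid order, then grouped into per-emitter
--       rows;
--     - the collectors contributed by an out-edge time t1 depend only on t1, so
--       each such "pass" is computed once (memoized, shared by all emitters);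
--     - a pass whose threshold is not a new strict running minimum for its emitter
--       is a subset of an earlier pass and is skipped outright.
--     """
--     edges = sorted(((a, b, t) for (a, b), t in timestamps.items()
--                     if 0 <= a < n and 0 <= b < n),
--                    key=lambda e: e[0] * n + e[1])
--     rows = {}
--     for a, b, t in edges:
--         rows.setdefault(a, []).append((b, t))
--
--     pass_cache = {}
--
--     def targets_after(t1):
--         # collectors of edges strictly later than t1, in (e, j) grid order
--         if t1 not in pass_cache:
--             pass_cache[t1] = [j for _e, j, t2 in edges if t1 < t2]
--         return pass_cache[t1]
--
--     neighborhoods = {}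
--     for i in range(n):
--         reachable = set()
--         m = None  # minimum out-edge time processed so far for this emitter
--         for _c, t1 in rows.get(i, []):
--             if m is None or t1 < m:
--                 m = t1
--                 reachable.update(targets_after(t1))
--         neighborhoods[i] = frozenset(reachable)
--     return neighborhoods
-- ===== Notes on version B (the rewrite author's own statement) =====
-- stated objective: faster
-- what changed: B never scans the n x n key grid: it lists the present in-range edges once from timestamps.items(), sorts them into grid order and groups them into per-emitter rows, memoizes the collectors contributed by each out-edge time (a 'pass' depends only on the time) in a cache shared by all emitters, and skips every out-edge whose time is not a new strict running minimum for its emitter (its pass is a subset of an earlier one); A instead runs four nested range(n) loops probing the dict at every grid cell for every out-edge. …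
import Mathlib
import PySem

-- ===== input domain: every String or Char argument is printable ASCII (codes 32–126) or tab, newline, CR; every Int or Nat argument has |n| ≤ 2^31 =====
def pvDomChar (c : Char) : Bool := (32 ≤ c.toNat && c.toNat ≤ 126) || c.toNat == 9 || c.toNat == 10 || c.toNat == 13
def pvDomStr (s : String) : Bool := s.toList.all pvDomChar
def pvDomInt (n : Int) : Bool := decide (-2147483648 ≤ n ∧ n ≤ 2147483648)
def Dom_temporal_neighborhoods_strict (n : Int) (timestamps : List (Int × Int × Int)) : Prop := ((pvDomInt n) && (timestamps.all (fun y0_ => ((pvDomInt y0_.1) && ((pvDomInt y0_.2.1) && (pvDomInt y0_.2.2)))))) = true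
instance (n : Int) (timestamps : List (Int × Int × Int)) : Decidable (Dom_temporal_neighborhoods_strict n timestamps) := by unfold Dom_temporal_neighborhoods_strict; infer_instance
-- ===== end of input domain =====

-- B lists the present edges once from timestamps.items() (sorted into grid order, grouped into
-- per-emitter rows), memoizes each time-threshold pass in a cache shared by all emitters, and
-- skips every out-edge whose time is not a new strict running minimum — objective: faster.

-- shared helper: timestamps[(a, b)] on the association list (first match), none = key absent
def pvTsGet? (ts : List (Int × Int × Int)) (a b : Int) : Option Int :=
  (ts.find? (fun e => e.1 == a && e.2.1 == b)).map (fun e => e.2.2)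

-- ===== PORT A =====
-- the result dict's keys i are the distinct values of range(n), so each assignment appends
def temporal_neighborhoods_strict (n : Int) (timestamps : List (Int × Int × Int)) : List (Int × List Int) :=
  (PySem.List.pyRange 0 n 1).foldl (fun neighborhoods i =>
    let reachable : PySem.Set Int :=
      (PySem.List.pyRange 0 n 1).foldl (fun r c =>
        match pvTsGet? timestamps i c with
        | none => r
        | some t1 =>
          (PySem.List.pyRange 0 n 1).foldl (fun r e =>
            (PySem.List.pyRange 0 n 1).foldl (fun r j =>
              match pvTsGet? timestamps e j with
              | none => r
              | some t2 => if t1 < t2 then PySem.Set.add r j else r) r) r) PySem.Set.empty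
    neighborhoods ++ [(i, reachable)]) []

-- ===== PORT B =====
-- targets_after(t1): the Python closure mutates pass_cache, so the port threads the cache
def pvTargetsAfterB (edges : List (Int × Int × Int))
    (cache : PySem.Dict Int (List Int)) (t1 : Int) : List Int × PySem.Dict Int (List Int) :=
  match cache.get? t1 with
  | some out => (out, cache)
  | none =>
    let out := (edges.filter (fun e => decide (t1 < e.2.2))).map (fun e => e.2.1)
    (out, cache.insert t1 out)

def temporal_neighborhoods_strict_alt (n : Int) (timestamps : List (Int × Int × Int)) : List (Int × List Int) :=
  let edges : List (Int × Int × Int) :=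
    PySem.List.sorted
      (timestamps.filter (fun e =>
        decide (0 ≤ e.1) && decide (e.1 < n) && decide (0 ≤ e.2.1) && decide (e.2.1 < n)))
      (fun e => e.1 * n + e.2.1) false
  let rows : PySem.Dict Int (List (Int × Int)) :=
    edges.foldl (fun d e => d.modify e.1 [] (· ++ [e.2])) PySem.Dict.empty
  ((PySem.List.pyRange 0 n 1).foldl (fun (st : List (Int × List Int) × PySem.Dict Int (List Int)) i =>
      let fin : PySem.Set Int × Option Int × PySem.Dict Int (List Int) :=
        (rows.getD i []).foldl (fun s ct =>
          match s.2.1 with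
          | none =>
            let p := pvTargetsAfterB edges s.2.2 ct.2
            (PySem.Set.update s.1 p.1, some ct.2, p.2)
          | some m =>
            if ct.2 < m then
              let p := pvTargetsAfterB edges s.2.2 ct.2
              (PySem.Set.update s.1 p.1, some ct.2, p.2)
            else s) (PySem.Set.empty, none, st.2)
      (st.1 ++ [(i, fin.1)], fin.2.2)) ([], PySem.Dict.empty)).1

-- ===== PRECONDITION & SPEC =====
-- Pre_ only excludes association lists with a repeated (emitter, collector) key: those do not
-- represent any Python dict (the input type of A), whose keys are necessarily distinct.
def Pre_temporal_neighborhoods_strict (n : Int) (timestamps : List (Int × Int × Int)) : Prop :=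
  (timestamps.map (fun e => (e.1, e.2.1))).Nodup
instance (n : Int) (timestamps : List (Int × Int × Int)) : Decidable (Pre_temporal_neighborhoods_strict n timestamps) := by unfold Pre_temporal_neighborhoods_strict; infer_instance

def pvWitness_temporal_neighborhoods_strict : Int × (List (Int × Int × Int)) :=
  (2, [(0, 1, 5), (1, 0, 7)])

def Spec_temporal_neighborhoods_strict (n : Int) (timestamps : List (Int × Int × Int)) (out : List (Int × List Int)) : Prop := out = temporal_neighborhoods_strict_alt n timestamps
instance (n : Int) (timestamps : List (Int × Int × Int)) (out : List (Int × List Int)) : Decidable (Spec_temporal_neighborhoods_strict n timestamps out) := by unfold Spec_temporal_neighborhoods_strict; infer_instance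

-- ===== CLAIM (what is proved, stated in full; the proofs are below) =====
def Claim_equal_temporal_neighborhoods_strict : Prop := ∀ (n : Int) (timestamps : List (Int × Int × Int)), Dom_temporal_neighborhoods_strict n timestamps → Pre_temporal_neighborhoods_strict n timestamps → Spec_temporal_neighborhoods_strict n timestamps (temporal_neighborhoods_strict n timestamps)

-- ===== LEMMAS AND PROOFS =====

-- the present out-edges of a, in ascending-collector order, as triples
def pvRowL (n : Int) (ts : List (Int × Int × Int)) (a : Int) : List (Int × Int × Int) :=
  (PySem.List.pyRange 0 n 1).flatMap
    (fun b => ((pvTsGet? ts a b).map (fun t => (a, b, t))).toList)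

-- all present edges in (emitter, collector) grid order
def pvEdgesL (n : Int) (ts : List (Int × Int × Int)) : List (Int × Int × Int) :=
  (PySem.List.pyRange 0 n 1).flatMap (pvRowL n ts)

-- the pass for threshold t1: qualified collectors in grid order
def pvPassF (n : Int) (ts : List (Int × Int × Int)) (t1 : Int) : List Int :=
  (PySem.List.pyRange 0 n 1).flatMap (fun e =>
    (PySem.List.pyRange 0 n 1).flatMap (fun j =>
      match pvTsGet? ts e j with
      | none => []
      | some t2 => if t1 < t2 then [j] else []))

lemma pv_mem_rowL {n : Int} {ts : List (Int × Int × Int)} {a : Int} {x : Int × Int × Int} :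
    x ∈ pvRowL n ts a ↔ x.1 = a ∧ x.2.1 ∈ PySem.List.pyRange 0 n 1 ∧ pvTsGet? ts a x.2.1 = some x.2.2 := by
  unfold pvRowL
  rw [List.mem_flatMap]
  constructor
  · rintro ⟨b, hb, hx⟩
    cases h : pvTsGet? ts a b <;> rw [h] at hx
    · simp at hx
    · simp at hx
      subst hx
      exact ⟨rfl, hb, h⟩
  · rintro ⟨h1, h2, h3⟩
    refine ⟨x.2.1, h2, ?_⟩
    rw [h3]
    obtain ⟨x1, x2, x3⟩ := x
    simp_all

lemma pv_mem_edgesL {n : Int} {ts : List (Int × Int × Int)} {x : Int × Int × Int} :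
    x ∈ pvEdgesL n ts ↔ x.1 ∈ PySem.List.pyRange 0 n 1 ∧ x.2.1 ∈ PySem.List.pyRange 0 n 1 ∧ pvTsGet? ts x.1 x.2.1 = some x.2.2 := by
  unfold pvEdgesL
  rw [List.mem_flatMap]
  constructor
  · rintro ⟨a, ha, hx⟩
    obtain ⟨h1, h2, h3⟩ := pv_mem_rowL.1 hx
    subst h1
    exact ⟨ha, h2, h3⟩
  · rintro ⟨h1, h2, h3⟩
    exact ⟨x.1, h1, pv_mem_rowL.2 ⟨rfl, h2, h3⟩⟩

-- with distinct keys, the first-match lookup agrees with plain membership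
lemma pv_get?_iff_mem {ts : List (Int × Int × Int)} (hnd : (ts.map (fun e => (e.1, e.2.1))).Nodup)
    {a b t : Int} : pvTsGet? ts a b = some t ↔ (a, b, t) ∈ ts := by
  unfold pvTsGet?
  constructor
  · intro h
    obtain ⟨e, he, hmap⟩ := Option.map_eq_some_iff.1 h
    have hfind := List.find?_some he
    have hmem := List.mem_of_find?_eq_some he
    simp at hfind
    obtain ⟨ha, hb⟩ := hfind
    have : e = (a, b, t) := by
      obtain ⟨e1, e2, e3⟩ := e
      simp_all
    rw [← this]; exact hmem
  · intro hmem
    have hpred : ((a, b, t).1 == a && (a, b, t).2.1 == b) = true := by simp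
    -- find? succeeds on some element; identify it via key-uniqueness
    cases hfind : ts.find? (fun e => e.1 == a && e.2.1 == b) with
    | none =>
      have := List.find?_eq_none.1 hfind _ hmem
      simp at this
    | some e =>
      have hmem' := List.mem_of_find?_eq_some hfind
      have hpred' := List.find?_some hfind
      simp at hpred'
      have : e = (a, b, t) := by
        have hinj := List.inj_on_of_nodup_map hnd
        have := hinj hmem' hmem (by
          obtain ⟨e1, e2, e3⟩ := e
          simp_all)
        exact this
      rw [this]
      simp

lemma pv_pyRange_nil {a b : Int} (h : b ≤ a) : PySem.List.pyRange a b = [] := by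
  refine List.eq_nil_iff_forall_not_mem.mpr (fun x hx => ?_)
  rw [PySem.List.mem_pyRange_one] at hx; omega

lemma pv_pyRange_nodup : ∀ (k : Nat) (a b : Int), (b - a).toNat = k → (PySem.List.pyRange a b 1).Nodup
  | 0, a, b, h => by rw [pv_pyRange_nil (by omega)]; exact List.nodup_nil
  | k + 1, a, b, h => by
    rw [PySem.List.pyRange_one_cons (by omega)]
    refine List.nodup_cons.2 ⟨fun hmem => ?_, pv_pyRange_nodup k (a + 1) b (by omega)⟩
    rw [PySem.List.mem_pyRange_one] at hmem; omega

-- flatMapping an "act only at i" family over a nodup list containing i yields exactly f i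
lemma pv_flatMap_single {β : Type} (i : Int) (f : Int → List β) :
    ∀ (L : List Int), L.Nodup → i ∈ L →
      (L.flatMap (fun a => if a = i then f a else [])) = f i := by
  intro L
  induction L with
  | nil => intro _ h; simp at h
  | cons a L ih =>
    intro hnd hmem
    obtain ⟨hna, hndL⟩ := List.nodup_cons.1 hnd
    rw [List.flatMap_cons]
    by_cases hai : a = i
    · subst hai
      rw [if_pos rfl]
      have : L.flatMap (fun a' => if a' = a then f a' else []) = [] := by
        refine List.flatMap_eq_nil_iff.2 (fun a' ha' => ?_)
        rw [if_neg (fun h => hna (by rw [← h]; exact ha'))]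
      rw [this, List.append_nil]
    · have hiL : i ∈ L := by
        cases List.mem_cons.1 hmem with
        | inl h => exact absurd h.symm hai
        | inr h => exact h
      rw [if_neg hai, List.nil_append]
      exact ih hndL hiL

-- grid-order pairwise bound for the sort key, by fuel induction over the emitter range
lemma pv_edges_pairwise_from : ∀ (k : Nat) (n : Int) (ts : List (Int × Int × Int)) (a : Int), (n - a).toNat = k →
    ((PySem.List.pyRange a n 1).flatMap (pvRowL n ts)).Pairwise
      (fun x y => x.1 * n + x.2.1 < y.1 * n + y.2.1)
  | 0, n, ts, a, hk => by
    rw [pv_pyRange_nil (by omega)]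
    simp
  | k + 1, n, ts, a, hk => by
    rw [PySem.List.pyRange_one_cons (by omega), List.flatMap_cons]
    refine List.pairwise_append.2 ⟨?_, pv_edges_pairwise_from k n ts (a + 1) (by omega), ?_⟩
    · -- within row a: collectors strictly increase
      have row : ∀ (m : Nat) (b : Int), (n - b).toNat = m →
          ((PySem.List.pyRange b n 1).flatMap
            (fun b => ((pvTsGet? ts a b).map (fun t => (a, b, t))).toList)).Pairwise
            (fun x y => x.1 * n + x.2.1 < y.1 * n + y.2.1) := by
        intro m
        induction m with
        | zero => intro b hb; rw [pv_pyRange_nil (by omega)]; simp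
        | succ m ih =>
          intro b hb
          rw [PySem.List.pyRange_one_cons (by omega), List.flatMap_cons]
          refine List.pairwise_append.2 ⟨?_, ih (b + 1) (by omega), ?_⟩
          · cases pvTsGet? ts a b <;> simp
          · intro x hx y hy
            cases h : pvTsGet? ts a b <;> rw [h] at hx
            · simp at hx
            · simp at hx
              subst hx
              obtain ⟨c, hc, hy⟩ := List.mem_flatMap.1 hy
              rw [PySem.List.mem_pyRange_one] at hc
              cases h' : pvTsGet? ts a c <;> rw [h'] at hy
              · simp at hy
              · simp at hy
                subst hy
                simp
                omega
      unfold pvRowL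
      exact row (n - 0).toNat 0 rfl
    · -- row a precedes every later row
      intro x hx y hy
      have hx' := pv_mem_rowL.1 (show x ∈ pvRowL n ts a from hx)
      obtain ⟨hx1, hx2, _⟩ := hx'
      obtain ⟨a', ha', hy⟩ := List.mem_flatMap.1 hy
      rw [PySem.List.mem_pyRange_one] at ha'
      obtain ⟨hy1, hy2, _⟩ := pv_mem_rowL.1 hy
      rw [PySem.List.mem_pyRange_one] at hx2 hy2
      have hexp : (a + 1) * n = a * n + n := by ring
      have h2 : (a + 1) * n ≤ a' * n :=
        mul_le_mul_of_nonneg_right (by omega) (by omega)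
      rw [hx1, hy1]
      omega

lemma pv_edges_pairwise (n : Int) (ts : List (Int × Int × Int)) :
    (pvEdgesL n ts).Pairwise (fun x y => x.1 * n + x.2.1 < y.1 * n + y.2.1) :=
  pv_edges_pairwise_from (n - 0).toNat n ts 0 rfl

-- B's sorted edge list is exactly the grid-ordered list of present edges
lemma pv_sorted_edges_eq (n : Int) (ts : List (Int × Int × Int))
    (hnd : (ts.map (fun e => (e.1, e.2.1))).Nodup) :
    PySem.List.sorted
      (ts.filter (fun e =>
        decide (0 ≤ e.1) && decide (e.1 < n) && decide (0 ≤ e.2.1) && decide (e.2.1 < n)))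
      (fun e => e.1 * n + e.2.1) false
    = pvEdgesL n ts := by
  refine PySem.List.sorted_eq_of_perm_of_pairwise_lt _ _ _ ?_ (pv_edges_pairwise n ts)
  have hnodupT : ts.Nodup := List.Nodup.of_map _ hnd
  have hnodupF : (ts.filter (fun e =>
      decide (0 ≤ e.1) && decide (e.1 < n) && decide (0 ≤ e.2.1) && decide (e.2.1 < n))).Nodup :=
    hnodupT.filter _
  have hnodupE : (pvEdgesL n ts).Nodup := by
    have hp := pv_edges_pairwise n ts
    refine hp.imp ?_
    intro a b h he
    subst he
    exact absurd h (lt_irrefl _)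
  rw [List.perm_ext_iff_of_nodup hnodupE hnodupF]
  intro x
  rw [pv_mem_edgesL, List.mem_filter]
  rw [PySem.List.mem_pyRange_one, PySem.List.mem_pyRange_one]
  constructor
  · rintro ⟨h1, h2, h3⟩
    have := (pv_get?_iff_mem hnd).1 h3
    refine ⟨by obtain ⟨x1, x2, x3⟩ := x; exact this, by simp; omega⟩
  · rintro ⟨hmem, hbound⟩
    simp at hbound
    refine ⟨⟨by omega, by omega⟩, ⟨by omega, by omega⟩, ?_⟩
    exact (pv_get?_iff_mem hnd).2 (by obtain ⟨x1, x2, x3⟩ := x; exact hmem)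

-- the grouped rows: rows[i] (default []) is row i without its emitter component
lemma pv_rows_getD (n : Int) (ts : List (Int × Int × Int)) (i : Int)
    (hi : i ∈ PySem.List.pyRange 0 n 1) :
    ((pvEdgesL n ts).foldl (fun d e => d.modify e.1 [] (· ++ [e.2])) PySem.Dict.empty).getD i []
      = (pvRowL n ts i).map (fun e => e.2) := by
  rw [PySem.Dict.getD_foldl_modify_append]
  rw [PySem.Dict.getD_empty]
  rw [List.nil_append]
  -- filter the grid-ordered edges down to emitter i: rows of other emitters vanish
  unfold pvEdgesL
  rw [List.filter_flatMap]
  have hrow : ∀ a, (pvRowL n ts a).filter (fun e => e.1 == i)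
      = if a = i then pvRowL n ts a else [] := by
    intro a
    by_cases hai : a = i
    · subst hai
      rw [if_pos rfl]
      refine List.filter_eq_self.2 (fun x hx => ?_)
      have := (pv_mem_rowL.1 hx).1
      simp [this]
    · rw [if_neg hai]
      refine List.filter_eq_nil_iff.2 (fun x hx => ?_)
      have := (pv_mem_rowL.1 hx).1
      simp [this, hai]
  have hnd := pv_pyRange_nodup (n - 0).toNat 0 n rfl
  rw [List.flatMap_congr (fun a _ => hrow a)]
  rw [pv_flatMap_single i (pvRowL n ts) _ hnd hi]

-- the list comprehension in targets_after computes exactly the pass for its threshold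
lemma pv_pass_eq (n : Int) (ts : List (Int × Int × Int)) (t1 : Int) :
    ((pvEdgesL n ts).filter (fun e => decide (t1 < e.2.2))).map (fun e => e.2.1)
      = pvPassF n ts t1 := by
  unfold pvEdgesL pvPassF
  rw [List.filter_flatMap, List.map_flatMap]
  refine List.flatMap_congr (fun a _ => ?_)
  unfold pvRowL
  rw [List.filter_flatMap, List.map_flatMap]
  refine List.flatMap_congr (fun b _ => ?_)
  cases h : pvTsGet? ts a b with
  | none => simp
  | some t2 => by_cases hlt : t1 < t2 <;> simp [hlt]

-- a later threshold's pass is contained in an earlier one's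
lemma pv_pass_mono (n : Int) (ts : List (Int × Int × Int)) {m t1 : Int} (h : m ≤ t1) :
    ∀ x ∈ pvPassF n ts t1, x ∈ pvPassF n ts m := by
  intro x hx
  unfold pvPassF at hx ⊢
  obtain ⟨e, he, hx⟩ := List.mem_flatMap.1 hx
  obtain ⟨j, hj, hx⟩ := List.mem_flatMap.1 hx
  refine List.mem_flatMap.2 ⟨e, he, List.mem_flatMap.2 ⟨j, hj, ?_⟩⟩
  cases hts : pvTsGet? ts e j with
  | none => simp only [hts] at hx; simp at hx
  | some t2 =>
    simp only [hts] at hx ⊢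
    by_cases hlt : t1 < t2
    · rw [if_pos hlt] at hx
      simp at hx
      subst hx
      simp [if_pos (lt_of_le_of_lt h hlt)]
    · rw [if_neg hlt] at hx; simp at hx

-- A's innermost collector scan, as a fold of Set.add over the collected pass fragment
lemma pv_innerAdd_inner (ts : List (Int × Int × Int)) (t1 e : Int) (L : List Int) (r : PySem.Set Int) :
    L.foldl (fun r j =>
        match pvTsGet? ts e j with
        | none => r
        | some t2 => if t1 < t2 then PySem.Set.add r j else r) r
      = (L.flatMap (fun j =>
          match pvTsGet? ts e j with
          | none => []
          | some t2 => if t1 < t2 then [j] else [])).foldl PySem.Set.add r := by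
  induction L generalizing r with
  | nil => rfl
  | cons j L ih =>
    cases h : pvTsGet? ts e j
    · simp [h, ih]
    · rename_i t2
      by_cases hlt : t1 < t2 <;> simp [h, hlt, ih]

-- A's two inner loops = one Set.update with the pass for t1
lemma pv_passA_eq_update (n : Int) (ts : List (Int × Int × Int)) (t1 : Int) (r : PySem.Set Int) :
    (PySem.List.pyRange 0 n 1).foldl (fun r e =>
        (PySem.List.pyRange 0 n 1).foldl (fun r j =>
          match pvTsGet? ts e j with
          | none => r
          | some t2 => if t1 < t2 then PySem.Set.add r j else r) r) r
      = PySem.Set.update r (pvPassF n ts t1) := by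
  unfold pvPassF PySem.Set.update
  rw [List.foldl_flatMap]
  refine PySem.List.foldl_congr_mem _ _ _ _ (fun r e _ => ?_)
  rw [pv_innerAdd_inner, List.foldl_flatMap]

-- updating with elements already present changes nothing
lemma pv_update_subset {s : PySem.Set Int} {L : List Int} (h : ∀ x ∈ L, x ∈ s) :
    PySem.Set.update s L = s := by
  induction L generalizing s with
  | nil => rfl
  | cons x L ih =>
    rw [PySem.Set.update_cons, PySem.Set.add_of_mem (h x (List.mem_cons_self ..))]
    exact ih (fun y hy => h y (List.mem_cons_of_mem _ hy))

-- the cache invariant: every stored pass is the pass for its key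
def pvCacheInv (n : Int) (ts : List (Int × Int × Int)) (cache : PySem.Dict Int (List Int)) : Prop :=
  ∀ t v, cache.get? t = some v → v = pvPassF n ts t

lemma pv_targetsAfterB_spec (n : Int) (ts : List (Int × Int × Int))
    (cache : PySem.Dict Int (List Int)) (t1 : Int) (hc : pvCacheInv n ts cache) :
    (pvTargetsAfterB (pvEdgesL n ts) cache t1).1 = pvPassF n ts t1
      ∧ pvCacheInv n ts (pvTargetsAfterB (pvEdgesL n ts) cache t1).2 := by
  unfold pvTargetsAfterB
  cases h : cache.get? t1 with
  | some out => exact ⟨hc t1 out h, hc⟩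
  | none =>
    refine ⟨pv_pass_eq n ts t1, ?_⟩
    intro t v hv
    rw [PySem.Dict.get?_insert] at hv
    by_cases ht : t = t1
    · rw [if_pos ht] at hv
      rw [ht, ← Option.some.inj hv]
      exact pv_pass_eq n ts t1
    · rw [if_neg ht] at hv
      exact hc t v hv

-- the running-minimum invariant: the pass for the recorded minimum is already in the set
def pvMinInv (n : Int) (ts : List (Int × Int × Int)) (s : PySem.Set Int) (m : Option Int) : Prop :=
  ∀ μ, m = some μ → ∀ x ∈ pvPassF n ts μ, x ∈ s

-- A's c-scan over any index list, re-expressed as a scan over the present (collector, time) pairs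
lemma pv_cloop_pairs (n : Int) (ts : List (Int × Int × Int)) (i : Int) :
    ∀ (L : List Int) (s : PySem.Set Int),
      L.foldl (fun r c =>
          match pvTsGet? ts i c with
          | none => r
          | some t1 => PySem.Set.update r (pvPassF n ts t1)) s
        = (L.flatMap (fun c => ((pvTsGet? ts i c).map (fun t => (c, t))).toList)).foldl
            (fun r ct => PySem.Set.update r (pvPassF n ts ct.2)) s := by
  intro L
  induction L with
  | nil => intro s; rfl
  | cons c L ih =>
    intro s
    cases h : pvTsGet? ts i c <;> simp [h, ih]

lemma pv_row_pairs (n : Int) (ts : List (Int × Int × Int)) (i : Int) :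
    (PySem.List.pyRange 0 n 1).flatMap (fun c => ((pvTsGet? ts i c).map (fun t => (c, t))).toList)
      = (pvRowL n ts i).map (fun e => e.2) := by
  unfold pvRowL
  rw [List.map_flatMap]
  refine List.flatMap_congr (fun b _ => ?_)
  cases h : pvTsGet? ts i b
  · simp [h]
  · simp [h]

-- B's loop body over one (collector, time) pair, as a named step function (definitional)
def pvStepB (n : Int) (ts : List (Int × Int × Int))
    (s : PySem.Set Int × Option Int × PySem.Dict Int (List Int)) (ct : Int × Int) :
    PySem.Set Int × Option Int × PySem.Dict Int (List Int) :=
  match s.2.1 with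
  | none =>
    let p := pvTargetsAfterB (pvEdgesL n ts) s.2.2 ct.2
    (PySem.Set.update s.1 p.1, some ct.2, p.2)
  | some m =>
    if ct.2 < m then
      let p := pvTargetsAfterB (pvEdgesL n ts) s.2.2 ct.2
      (PySem.Set.update s.1 p.1, some ct.2, p.2)
    else s

lemma pvStepB_none (n : Int) (ts : List (Int × Int × Int)) (s : PySem.Set Int)
    (cache : PySem.Dict Int (List Int)) (ct : Int × Int) :
    pvStepB n ts (s, none, cache) ct
      = (PySem.Set.update s (pvTargetsAfterB (pvEdgesL n ts) cache ct.2).1, some ct.2,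
          (pvTargetsAfterB (pvEdgesL n ts) cache ct.2).2) := rfl

lemma pvStepB_some_lt (n : Int) (ts : List (Int × Int × Int)) (s : PySem.Set Int) (μ : Int)
    (cache : PySem.Dict Int (List Int)) (ct : Int × Int) (h : ct.2 < μ) :
    pvStepB n ts (s, some μ, cache) ct
      = (PySem.Set.update s (pvTargetsAfterB (pvEdgesL n ts) cache ct.2).1, some ct.2,
          (pvTargetsAfterB (pvEdgesL n ts) cache ct.2).2) := by
  unfold pvStepB
  simp [h]

lemma pvStepB_some_ge (n : Int) (ts : List (Int × Int × Int)) (s : PySem.Set Int) (μ : Int)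
    (cache : PySem.Dict Int (List Int)) (ct : Int × Int) (h : ¬ ct.2 < μ) :
    pvStepB n ts (s, some μ, cache) ct = (s, some μ, cache) := by
  unfold pvStepB
  simp [h]

-- joint induction over the row scan: A's set equals B's, cache and minimum invariants are kept
lemma pv_inner_eq (n : Int) (ts : List (Int × Int × Int)) :
    ∀ (L : List (Int × Int)) (s : PySem.Set Int) (m : Option Int) (cache : PySem.Dict Int (List Int)),
      pvCacheInv n ts cache → pvMinInv n ts s m →
      (L.foldl (fun r ct => PySem.Set.update r (pvPassF n ts ct.2)) s
        = (L.foldl (pvStepB n ts) (s, m, cache)).1)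
      ∧ pvCacheInv n ts (L.foldl (pvStepB n ts) (s, m, cache)).2.2 := by
  intro L
  induction L with
  | nil => intro s m cache hc _; exact ⟨rfl, hc⟩
  | cons ct L ih =>
    intro s m cache hc hm
    rw [List.foldl_cons, List.foldl_cons]
    cases m with
    | none =>
      obtain ⟨h1, h2⟩ := pv_targetsAfterB_spec n ts cache ct.2 hc
      rw [pvStepB_none, h1]
      refine ih _ (some ct.2) _ h2 ?_
      intro μ hμ x hx
      rw [Option.some.injEq] at hμ
      subst hμ
      exact (PySem.Set.mem_update _ _ _).mpr (Or.inr hx)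
    | some μ =>
      by_cases hlt : ct.2 < μ
      · obtain ⟨h1, h2⟩ := pv_targetsAfterB_spec n ts cache ct.2 hc
        rw [pvStepB_some_lt n ts s μ cache ct hlt, h1]
        refine ih _ (some ct.2) _ h2 ?_
        intro μ' hμ' x hx
        rw [Option.some.injEq] at hμ'
        subst hμ'
        exact (PySem.Set.mem_update _ _ _).mpr (Or.inr hx)
      · rw [pvStepB_some_ge n ts s μ cache ct hlt]
        have hskip : PySem.Set.update s (pvPassF n ts ct.2) = s :=
          pv_update_subset (fun x hx => hm μ rfl x (pv_pass_mono n ts (by omega) x hx))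
        rw [hskip]
        exact ih s (some μ) cache hc hm

-- the outer emitter scan: carry the cache invariant across emitters
lemma pv_outer_eq (n : Int) (ts : List (Int × Int × Int)) :
    ∀ (L : List Int) (hL : ∀ i ∈ L, i ∈ PySem.List.pyRange 0 n 1)
      (out : List (Int × List Int)) (cache : PySem.Dict Int (List Int)),
      pvCacheInv n ts cache →
      L.foldl (fun neighborhoods i =>
        let reachable : PySem.Set Int :=
          (PySem.List.pyRange 0 n 1).foldl (fun r c =>
            match pvTsGet? ts i c with
            | none => r
            | some t1 =>
              (PySem.List.pyRange 0 n 1).foldl (fun r e =>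
                (PySem.List.pyRange 0 n 1).foldl (fun r j =>
                  match pvTsGet? ts e j with
                  | none => r
                  | some t2 => if t1 < t2 then PySem.Set.add r j else r) r) r) PySem.Set.empty
        neighborhoods ++ [(i, reachable)]) out
      = (L.foldl (fun (st : List (Int × List Int) × PySem.Dict Int (List Int)) i =>
          let fin : PySem.Set Int × Option Int × PySem.Dict Int (List Int) :=
            (((pvEdgesL n ts).foldl (fun d e => d.modify e.1 [] (· ++ [e.2])) PySem.Dict.empty).getD i []).foldl
              (pvStepB n ts) (PySem.Set.empty, none, st.2)
          (st.1 ++ [(i, fin.1)], fin.2.2)) (out, cache)).1 := by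
  intro L
  induction L with
  | nil => intro _ out cache _; rfl  -- hL unused here
  | cons i L ih =>
    intro hL out cache hc
    rw [List.foldl_cons, List.foldl_cons]
    have hi : i ∈ PySem.List.pyRange 0 n 1 := hL i (List.mem_cons_self ..)
    have hA :
        (PySem.List.pyRange 0 n 1).foldl (fun r c =>
            match pvTsGet? ts i c with
            | none => r
            | some t1 =>
              (PySem.List.pyRange 0 n 1).foldl (fun r e =>
                (PySem.List.pyRange 0 n 1).foldl (fun r j =>
                  match pvTsGet? ts e j with
                  | none => r
                  | some t2 => if t1 < t2 then PySem.Set.add r j else r) r) r) PySem.Set.empty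
          = ((pvRowL n ts i).map (fun e => e.2)).foldl
              (fun r ct => PySem.Set.update r (pvPassF n ts ct.2)) PySem.Set.empty := by
      have hstep : ∀ (r : PySem.Set Int), ∀ c ∈ PySem.List.pyRange 0 n 1,
          (match pvTsGet? ts i c with
            | none => r
            | some t1 =>
              (PySem.List.pyRange 0 n 1).foldl (fun r e =>
                (PySem.List.pyRange 0 n 1).foldl (fun r j =>
                  match pvTsGet? ts e j with
                  | none => r
                  | some t2 => if t1 < t2 then PySem.Set.add r j else r) r) r)
          = (match pvTsGet? ts i c with
            | none => r
            | some t1 => PySem.Set.update r (pvPassF n ts t1)) := by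
        intro r c _
        cases h : pvTsGet? ts i c
        · rfl
        · exact pv_passA_eq_update n ts _ r
      rw [PySem.List.foldl_congr_mem _ _ _ PySem.Set.empty hstep]
      rw [pv_cloop_pairs n ts i]
      rw [pv_row_pairs]
    rw [hA]
    rw [pv_rows_getD n ts i hi]
    obtain ⟨heq, hc'⟩ := pv_inner_eq n ts ((pvRowL n ts i).map (fun e => e.2))
      PySem.Set.empty none cache hc (by intro μ h; cases h)
    rw [heq]
    exact ih (fun i' hi' => hL i' (List.mem_cons_of_mem _ hi')) _ _ hc'

-- ===== VERDICT (by name: the statement is the Claim_ definition above) =====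
theorem temporal_neighborhoods_strict_spec : Claim_equal_temporal_neighborhoods_strict := by
  intro n ts _ hPre
  unfold Spec_temporal_neighborhoods_strict
  simp only [temporal_neighborhoods_strict, temporal_neighborhoods_strict_alt]
  rw [pv_sorted_edges_eq n ts hPre]
  exact pv_outer_eq n ts (PySem.List.pyRange 0 n 1) (fun i hi => hi) [] PySem.Dict.empty
    (by intro t v h; rw [PySem.Dict.get?_empty] at h; cases h)
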